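-- pv_equiv track=rewrite | github.com/search2026/coding_exercise_python | solutions/even_odd_operations.py | getMaximumScore
-- ===== SOURCE A (Python) =====
-- from typing import Any, Dict, List, Set, Optional
--
-- def getMaximumScore(integerArray: List[int]) -> int:
--     n = len(integerArray)
--
--     # Precompute prefix sums for quick range sum lookups
--     prefix_sum = [0] * (n + 1)
--     for i in range(n):
--         prefix_sum[i + 1] = prefix_sum[i] + integerArray[i]
--
--     def get_sum(l, r):
--         return prefix_sum[r + 1] - prefix_sum[l]
--
--     # dp[left][right][op_num % 2] will store the result
--     dp = [[[None for _ in range(2)] for _ in range(n)] for _ in range(n)]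
--
--     def helper(left, right, op_num):
--         if left > right:
--             return 0
--
--         turn: int = op_num % 2
--         if dp[left][right][turn] is not None:
--             return dp[left][right][turn]
--
--         current_sum = get_sum(left, right)
--
--         if op_num % 2 == 1:  # odd operation (1-indexed): add sum
--             score_left = current_sum + helper(left + 1, right, op_num + 1)
--             score_right = current_sum + helper(left, right - 1, op_num + 1)
--             dp[left][right][turn] = max(score_left, score_right)
--         else:  # even operation: subtract sum
--             score_left = -current_sum + helper(left + 1, right, op_num + 1)
--             score_right = -current_sum + helper(left, right - 1, op_num + 1)
--             dp[left][right][turn] = max(score_left, score_right)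
--
--         return dp[left][right][turn]
--
--     return helper(0, n - 1, 1)
-- ===== SOURCE B (Python) =====
-- from typing import List
--
-- def getMaximumScore(integerArray: List[int]) -> int:
--     n = len(integerArray)
--     prefix = [0]
--     for x in integerArray:
--         prefix.append(prefix[-1] + x)
--     # row[l] = best score for the interval [l, l+length-1]; length 0 rows are all 0
--     row = [0] * (n + 1)
--     for length in range(1, n + 1):
--         sign = 1 if (n - length) % 2 == 0 else -1
--         row = [sign * (prefix[l + length] - prefix[l]) + max(row[l], row[l + 1])
--                for l in range(len(row) - 1)]
--     return row[0]
-- ===== Notes on version B (the rewrite author's own statement) =====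
-- stated objective: alternative
-- what changed: Replaces A's top-down memoized recursion over (left, right, op-parity) with an iterative bottom-up DP that rebuilds one row per interval length, deriving the add/subtract sign from the length parity instead of a carried op counter.
import Mathlib
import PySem

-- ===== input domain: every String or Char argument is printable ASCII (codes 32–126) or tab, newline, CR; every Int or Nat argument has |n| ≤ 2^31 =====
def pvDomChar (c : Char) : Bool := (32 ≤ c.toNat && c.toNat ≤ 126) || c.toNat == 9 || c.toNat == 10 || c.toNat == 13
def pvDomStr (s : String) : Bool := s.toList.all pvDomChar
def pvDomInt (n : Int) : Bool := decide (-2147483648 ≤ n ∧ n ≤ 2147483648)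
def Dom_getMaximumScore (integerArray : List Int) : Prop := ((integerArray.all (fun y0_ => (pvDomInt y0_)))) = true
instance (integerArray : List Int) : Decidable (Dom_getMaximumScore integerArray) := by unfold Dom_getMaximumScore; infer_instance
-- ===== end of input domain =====

-- B replaces A's top-down memoized interval recursion by an iterative bottom-up DP filling one
-- row per interval length (sign derived from the length parity); same results, same asymptotic cost.

-- ===== PORT A =====
-- A's `helper(left, right, op_num)`: the memo table `dp` is pure caching of this recursion's
-- values and does not affect the returned value, so the port is the recursion itself.
def pvHelperA (ps : List Int) (left right opNum : Int) : Int :=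
  if left > right then 0
  else
    let currentSum := PySem.List.pyGetD ps (right + 1) 0 - PySem.List.pyGetD ps left 0
    if PySem.Int.mod opNum 2 == 1 then
      max (currentSum + pvHelperA ps (left + 1) right (opNum + 1))
          (currentSum + pvHelperA ps left (right - 1) (opNum + 1))
    else
      max (-currentSum + pvHelperA ps (left + 1) right (opNum + 1))
          (-currentSum + pvHelperA ps left (right - 1) (opNum + 1))
termination_by (right - left + 1).toNat
decreasing_by all_goals (simp at *; omega)

def getMaximumScore (integerArray : List Int) : Int :=
  let n : Int := integerArray.length
  -- prefix_sum = [0]*(n+1); for i in range(n): prefix_sum[i+1] = prefix_sum[i] + integerArray[i]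
  let ps := (PySem.List.pyRange 0 n 1).foldl
    (fun p i => p.set (i + 1).toNat (PySem.List.pyGetD p i 0 + PySem.List.pyGetD integerArray i 0))
    (List.replicate (integerArray.length + 1) 0)
  pvHelperA ps 0 (n - 1) 1

-- ===== PORT B =====
-- one refill of `row` for a given interval length (the list comprehension in Source B)
def pvRowStep (n : Int) (pre : List Int) (row : List Int) (len : Int) : List Int :=
  let sign : Int := if PySem.Int.mod (n - len) 2 == 0 then 1 else -1
  (PySem.List.pyRange 0 ((row.length : Int) - 1) 1).map (fun l =>
    sign * (PySem.List.pyGetD pre (l + len) 0 - PySem.List.pyGetD pre l 0) +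
    max (PySem.List.pyGetD row l 0) (PySem.List.pyGetD row (l + 1) 0))

def getMaximumScore_alt (integerArray : List Int) : Int :=
  let n : Int := integerArray.length
  -- prefix = [0]; for x in integerArray: prefix.append(prefix[-1] + x)
  let pre := integerArray.foldl (fun p x => p ++ [PySem.List.pyGetD p (-1) 0 + x]) [0]
  let finalRow := (PySem.List.pyRange 1 (n + 1) 1).foldl (pvRowStep n pre)
    (List.replicate (integerArray.length + 1) 0)
  PySem.List.pyGetD finalRow 0 0

-- ===== PRECONDITION & SPEC =====
def Spec_getMaximumScore (integerArray : List Int) (out : Int) : Prop := out = getMaximumScore_alt integerArray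
instance (integerArray : List Int) (out : Int) : Decidable (Spec_getMaximumScore integerArray out) := by unfold Spec_getMaximumScore; infer_instance

-- ===== CLAIM (what is proved, stated in full; the proofs are below) =====
def Claim_equal_getMaximumScore : Prop := ∀ (integerArray : List Int), Dom_getMaximumScore integerArray → Spec_getMaximumScore integerArray (getMaximumScore integerArray)

-- ===== LEMMAS AND PROOFS =====

-- the list of prefix sums both programs build
def pvP (xs : List Int) : List Int := (List.range (xs.length + 1)).map (fun j => (xs.take j).sum)

lemma pv_getD_last (q : List Int) (s : Int) : PySem.List.pyGetD (q ++ [s]) (-1) 0 = s := by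
  simp [PySem.List.pyGetD, PySem.List.pyGet?, PySem.List.pyIdx?]

-- B's append-loop builds the prefix sums
lemma pv_prefixB (xs : List Int) : ∀ (q : List Int) (s : Int),
    xs.foldl (fun p x => p ++ [PySem.List.pyGetD p (-1) 0 + x]) (q ++ [s])
      = q ++ (List.range (xs.length + 1)).map (fun j => s + (xs.take j).sum) := by
  induction xs with
  | nil => intro q s; simp
  | cons x xs ih =>
    intro q s
    simp only [List.foldl_cons, pv_getD_last]
    rw [ih (q ++ [s]) (s + x)]
    simp [List.range_succ_eq_map, List.map_map, Function.comp_def, add_assoc]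

lemma pv_prefixB' (xs : List Int) :
    xs.foldl (fun p x => p ++ [PySem.List.pyGetD p (-1) 0 + x]) [0] = pvP xs := by
  have := pv_prefixB xs [] 0
  simpa [pvP] using this

-- A's index-loop builds the same prefix sums
lemma pv_prefixA (xs : List Int) : ∀ (k : Nat), k ≤ xs.length →
    (PySem.List.pyRange 0 (k : Int) 1).foldl
      (fun p i => p.set (i + 1).toNat (PySem.List.pyGetD p i 0 + PySem.List.pyGetD xs i 0))
      (List.replicate (xs.length + 1) 0)
      = (List.range (k + 1)).map (fun j => (xs.take j).sum) ++ List.replicate (xs.length - k) 0 := by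
  intro k hk
  induction k with
  | zero =>
    rw [PySem.List.pyRange_one_eq_nil (by norm_num), List.foldl_nil]
    simp [List.replicate_succ]
  | succ k ih =>
    have hk' : k ≤ xs.length := by omega
    have hrange : PySem.List.pyRange 0 ((k : Int) + 1) 1 = PySem.List.pyRange 0 (k : Int) 1 ++ [(k : Int)] :=
      PySem.List.pyRange_one_succ_right (by exact_mod_cast Nat.zero_le k)
    rw [show ((k + 1 : Nat) : Int) = (k : Int) + 1 by push_cast; ring, hrange, List.foldl_append,
       ih hk', List.foldl_cons, List.foldl_nil]
    have hlen : ((List.range (k + 1)).map (fun j => (xs.take j).sum)).length = k + 1 := by simp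
    have h1 : PySem.List.pyGetD ((List.range (k + 1)).map (fun j => (xs.take j).sum)
        ++ List.replicate (xs.length - k) 0) (k : Int) 0 = (xs.take k).sum := by
      rw [PySem.List.pyGetD_natCast, List.getD_append _ _ _ k (by omega)]
      exact PySem.List.getD_map_range (fun j => (xs.take j).sum) (k + 1) k 0 (by omega)
    have h2 : PySem.List.pyGetD xs (k : Int) 0 = xs.getD k 0 := PySem.List.pyGetD_natCast xs k 0
    rw [h1, h2]
    have hset : ((k : Int) + 1).toNat = k + 1 := by omega
    rw [hset]
    have hrep : List.replicate (xs.length - k) (0 : Int) = 0 :: List.replicate (xs.length - (k + 1)) 0 := by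
      rw [show xs.length - k = (xs.length - (k + 1)) + 1 by omega, List.replicate_succ]
    rw [hrep, List.set_append_right (k + 1) _ (by omega), hlen]
    simp only [Nat.sub_self, List.set_cons_zero]
    have hidx : k < xs.length := by omega
    have hsum : (xs.take (k + 1)).sum = (xs.take k).sum + xs.getD k 0 := by
      rw [List.sum_take_succ xs k hidx, List.getD_eq_getElem xs 0 hidx]
    conv_rhs => rw [List.range_succ, List.map_append]
    simp [hsum, List.append_assoc, List.getD]

-- the row after processing all lengths 1..L
def pvRowL (xs : List Int) (L : Nat) : List Int :=
  (List.range (xs.length + 1 - L)).map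
    (fun (l : Nat) => pvHelperA (pvP xs) (l : Int) ((l : Int) + (L : Int) - 1) ((xs.length : Int) - (L : Int) + 1))

lemma pv_rowL_len (xs : List Int) (L : Nat) : (pvRowL xs L).length = xs.length + 1 - L := by
  simp [pvRowL]

lemma pv_rowL_zero (xs : List Int) : pvRowL xs 0 = List.replicate (xs.length + 1) 0 := by
  have h : ∀ b ∈ pvRowL xs 0, b = (0 : Int) := by
    intro b hb
    simp only [pvRowL, List.mem_map] at hb
    obtain ⟨l, -, hl⟩ := hb
    rw [pvHelperA, if_pos (by push_cast; omega)] at hl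
    exact hl.symm
  have := List.eq_replicate_of_mem h
  rwa [pv_rowL_len, Nat.sub_zero] at this

lemma pv_getD_P (xs : List Int) (j : Nat) (hj : j ≤ xs.length) :
    PySem.List.pyGetD (pvP xs) (j : Int) 0 = (xs.take j).sum := by
  rw [PySem.List.pyGetD_natCast]
  simpa [pvP] using PySem.List.getD_map_range (fun j => (xs.take j).sum) (xs.length + 1) j 0 (by omega)

lemma pv_getD_RowL (xs : List Int) (L l : Nat) (hl : l < xs.length + 1 - L) :
    PySem.List.pyGetD (pvRowL xs L) (l : Int) 0
      = pvHelperA (pvP xs) (l : Int) ((l : Int) + (L : Int) - 1) ((xs.length : Int) - (L : Int) + 1) := by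
  rw [PySem.List.pyGetD_natCast]
  unfold pvRowL
  exact PySem.List.getD_map_range
    (fun l => pvHelperA (pvP xs) (l : Int) ((l : Int) + (L : Int) - 1) ((xs.length : Int) - (L : Int) + 1))
    (xs.length + 1 - L) l 0 hl

-- one pvRowStep advances pvRowL by one length
lemma pv_rowStep (xs : List Int) (L : Nat) (hL : L < xs.length) :
    pvRowStep (xs.length : Int) (pvP xs) (pvRowL xs L) ((L : Int) + 1) = pvRowL xs (L + 1) := by
  simp only [pvRowStep]
  rw [pv_rowL_len]
  have hlen : ((xs.length + 1 - L : Nat) : Int) - 1 = ((xs.length - L : Nat) : Int) := by omega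
  rw [hlen, PySem.List.pyRange_zero_nat, List.map_map]
  rw [show pvRowL xs (L + 1)
      = (List.range (xs.length + 1 - (L + 1))).map
          (fun (l : Nat) => pvHelperA (pvP xs) (l : Int) ((l : Int) + ((L + 1 : Nat) : Int) - 1)
            ((xs.length : Int) - ((L + 1 : Nat) : Int) + 1)) from rfl]
  rw [show xs.length + 1 - (L + 1) = xs.length - L by omega]
  apply List.map_congr_left
  intro l hml
  have hl : l < xs.length - L := List.mem_range.mp hml
  simp only [Function.comp_apply]
  -- RHS: unfold one step of A's recursion
  rw [pvHelperA]
  rw [if_neg (show ¬ ((l : Int) > (l : Int) + ((L + 1 : Nat) : Int) - 1) by push_cast; omega)]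
  -- indices into the prefix-sum list
  have hi1 : (l : Int) + ((L : Int) + 1) = ((l + L + 1 : Nat) : Int) := by push_cast; ring
  have hi2 : (l : Int) + ((L + 1 : Nat) : Int) - 1 + 1 = ((l + L + 1 : Nat) : Int) := by push_cast; ring
  rw [hi1, hi2, pv_getD_P xs (l + L + 1) (by omega), pv_getD_P xs l (by omega)]
  -- the two subinterval values
  rw [pv_getD_RowL xs L l (by omega)]
  rw [show ((l : Int) + 1) = ((l + 1 : Nat) : Int) by push_cast; ring,
     pv_getD_RowL xs L (l + 1) (by omega)]
  -- align the recursive-call arguments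
  have e2 : (l : Int) + ((L + 1 : Nat) : Int) - 1 = ((l + 1 : Nat) : Int) + (L : Int) - 1 := by push_cast; ring
  have e3 : (l : Int) + ((L + 1 : Nat) : Int) - 1 - 1 = (l : Int) + (L : Int) - 1 := by push_cast; ring
  have e4 : (xs.length : Int) - ((L + 1 : Nat) : Int) + 1 + 1 = (xs.length : Int) - (L : Int) + 1 := by push_cast; ring
  rw [e3, e2, e4]
  -- the two parity tests agree (B: (n-(L+1)) % 2 == 0; A: op = n-(L+1)+1, op % 2 == 1)
  have hm1 : PySem.Int.mod ((xs.length : Int) - ((L : Int) + 1)) 2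
      = ((xs.length : Int) - ((L : Int) + 1)) % 2 := PySem.Int.mod_eq_emod_of_pos (by norm_num)
  have hm2 : PySem.Int.mod ((xs.length : Int) - ((L + 1 : Nat) : Int) + 1) 2
      = ((xs.length : Int) - ((L + 1 : Nat) : Int) + 1) % 2 := PySem.Int.mod_eq_emod_of_pos (by norm_num)
  have hc : ((L + 1 : Nat) : Int) = (L : Int) + 1 := by push_cast; ring
  by_cases hpar : ((xs.length : Int) - ((L : Int) + 1)) % 2 = 0
  · have hodd : ((xs.length : Int) - ((L + 1 : Nat) : Int) + 1) % 2 = 1 := by rw [hc]; omega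
    rw [if_pos (show (PySem.Int.mod ((xs.length : Int) - ((L : Int) + 1)) 2 == 0) = true by
          rw [hm1, hpar]; rfl),
       if_pos (show (PySem.Int.mod ((xs.length : Int) - ((L + 1 : Nat) : Int) + 1) 2 == 1) = true by
          rw [hm2, hodd]; rfl)]
    simp only [max_add_add_left, max_comm]
    ring_nf
  · have hpar' : ((xs.length : Int) - ((L : Int) + 1)) % 2 = 1 := by omega
    have heven : ((xs.length : Int) - ((L + 1 : Nat) : Int) + 1) % 2 = 0 := by rw [hc]; omega
    rw [if_neg (show ¬ (PySem.Int.mod ((xs.length : Int) - ((L : Int) + 1)) 2 == 0) = true by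
          rw [hm1, hpar']; decide),
       if_neg (show ¬ (PySem.Int.mod ((xs.length : Int) - ((L + 1 : Nat) : Int) + 1) 2 == 1) = true by
          rw [hm2, heven]; decide)]
    simp only [max_add_add_left, max_comm]
    ring_nf

lemma pv_foldRows (xs : List Int) : ∀ (L : Nat), L ≤ xs.length →
    (PySem.List.pyRange 1 ((L : Int) + 1) 1).foldl (pvRowStep (xs.length : Int) (pvP xs))
      (List.replicate (xs.length + 1) 0) = pvRowL xs L := by
  intro L hL
  induction L with
  | zero => simp [pv_rowL_zero, PySem.List.pyRange]
  | succ L ih =>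
    have hL' : L ≤ xs.length := by omega
    have hrange : PySem.List.pyRange 1 ((L : Int) + 1 + 1) 1
        = PySem.List.pyRange 1 ((L : Int) + 1) 1 ++ [(L : Int) + 1] :=
      PySem.List.pyRange_one_succ_right (by omega)
    rw [show (((L + 1 : Nat) : Int) + 1) = (L : Int) + 1 + 1 by push_cast; ring, hrange,
       List.foldl_append, ih hL', List.foldl_cons, List.foldl_nil]
    exact pv_rowStep xs L (by omega)

-- ===== VERDICT (by name: the statement is the Claim_ definition above) =====
theorem getMaximumScore_spec : Claim_equal_getMaximumScore := by
  intro xs _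
  unfold Spec_getMaximumScore
  simp only [getMaximumScore, getMaximumScore_alt]
  rw [pv_prefixB']
  have hA := pv_prefixA xs xs.length (le_refl _)
  simp only [Nat.sub_self, List.replicate_zero, List.append_nil] at hA
  rw [hA]
  rw [pv_foldRows xs xs.length (le_refl _)]
  have h0 := pv_getD_RowL xs xs.length 0 (by omega)
  rw [show ((0 : Nat) : Int) = (0 : Int) from rfl] at h0
  rw [h0]
  rw [show (0 : Int) + (xs.length : Int) - 1 = (xs.length : Int) - 1 by ring,
     show (xs.length : Int) - (xs.length : Int) + 1 = 1 by ring]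
  unfold pvP
  rfl
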